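-- pv_equiv track=rewrite | github.com/shasankp000/Lexis | compression/pipeline/stage5_encode.py | apply_case_flag
-- ===== SOURCE A (Python) =====
-- CASE_LOWER = 0
--
-- CASE_TITLE = 1
--
-- CASE_UPPER = 2
--
-- def apply_case_flag(word: str, flag: int, bitmap: int = 0) -> str:
--     """Apply a case flag (and optional bitmap) to a lowercase word."""
--     if not word:
--         return word
--     if flag == CASE_LOWER:
--         return word
--     if flag == CASE_TITLE:
--         return word[0].upper() + word[1:]
--     if flag == CASE_UPPER:
--         return word.upper()
--     # CASE_MIXED — char 0 is always lowercase; bitmap bit 0 = char index 1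
--     chars = list(word.lower())
--     for bit_pos, char_idx in enumerate(range(1, len(chars))):
--         if bitmap & (1 << bit_pos):
--             chars[char_idx] = chars[char_idx].upper()
--     return "".join(chars)
-- ===== SOURCE B (Python) =====
-- CASE_LOWER = 0
--
-- CASE_TITLE = 1
--
-- CASE_UPPER = 2
--
-- def apply_case_flag(word: str, flag: int, bitmap: int = 0) -> str:
--     """Apply a case flag (and optional bitmap) to a lowercase word."""
--     if not word:
--         return word
--     if flag == CASE_LOWER:
--         return word
--     if flag == CASE_TITLE:
--         return word[0].upper() + word[1:]
--     if flag == CASE_UPPER: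
--         return word.upper()
--     # CASE_MIXED: enumerate only the SET bits of the bitmap.  First mask the
--     # bitmap down to the bits that address real character positions (bit i
--     # names char index i+1), which also makes a negative bitmap finite; then
--     # repeatedly peel off the lowest set bit and uppercase the one character
--     # it names.  Characters whose bit is clear are never visited.
--     chars = list(word.lower())
--     bm = bitmap & ((1 << (len(chars) - 1)) - 1)
--     while bm:
--         rest = bm & (bm - 1)            # bm with its lowest set bit cleared
--         idx = (bm - rest).bit_length()  # lowest set bit position + 1 = char index
--         chars[idx] = chars[idx].upper()
--         bm = rest
--     return "".join(chars)
-- ===== Notes on version B (the rewrite author's own statement) =====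
-- stated objective: faster
-- what changed: The mixed-case branch no longer scans every character position testing bitmap & (1 << bit_pos); it masks the bitmap to the word's positions once and then enumerates only its SET bits, peeling off the lowest set bit (bm & (bm-1)) each round and uppercasing the single character that bit names via bit_length.
import Mathlib
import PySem

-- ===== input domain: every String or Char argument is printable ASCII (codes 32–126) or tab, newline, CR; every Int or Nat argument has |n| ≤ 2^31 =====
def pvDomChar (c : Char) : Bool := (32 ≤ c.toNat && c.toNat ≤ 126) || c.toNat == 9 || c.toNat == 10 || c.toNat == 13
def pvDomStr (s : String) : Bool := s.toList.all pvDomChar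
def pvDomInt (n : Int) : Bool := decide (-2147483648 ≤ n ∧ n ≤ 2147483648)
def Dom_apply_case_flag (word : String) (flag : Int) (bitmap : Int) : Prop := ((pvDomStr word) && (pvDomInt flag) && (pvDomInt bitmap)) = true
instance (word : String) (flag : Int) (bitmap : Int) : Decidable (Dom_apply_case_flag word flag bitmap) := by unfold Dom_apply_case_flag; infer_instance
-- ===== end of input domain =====

-- B's mixed-case branch enumerates only the SET bits of the bitmap (masked to the word's positions),
-- peeling off the lowest set bit each round, instead of A's scan over every character position.

-- ===== PORT A =====
-- for bit_pos, char_idx in enumerate(range(1, len(chars))): if bitmap & (1 << bit_pos): chars[char_idx] = chars[char_idx].upper()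
-- (bit_pos/char_idx are the nonnegative Ints produced by enumerate/range; .toNat is exact on them;
--  chars[char_idx] is always in range in Python, ported with getD ' ')
def acfLoopA (bitmap : Int) (cs0 : List Char) : List Char :=
  (PySem.List.enumerate (PySem.List.pyRange 1 (cs0.length : Int) 1) 0).foldl
    (fun cs pc =>
      if PySem.Int.band bitmap ((1 : Int) <<< pc.1.toNat) ≠ 0 then
        cs.set pc.2.toNat (PySem.Chars.upperChar (cs.getD pc.2.toNat ' '))
      else cs) cs0

def apply_case_flag (word : String) (flag : Int) (bitmap : Int) : String :=
  if word = "" then word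
  else if flag = 0 then word
  else if flag = 1 then
    -- word[0].upper() + word[1:]  (pyGet? is some: word is nonempty)
    match PySem.Str.pyGet? word 0 with
    | some c => String.mk (PySem.Chars.upper [c] ++ PySem.Chars.slice word.toList (some 1) none)
    | none => word
  else if flag = 2 then PySem.Str.upper word
  else String.mk (acfLoopA bitmap (PySem.Chars.lower word.toList))

-- ===== PORT B =====
-- while bm: rest = bm & (bm - 1); idx = (bm - rest).bit_length(); chars[idx] = chars[idx].upper(); bm = rest
-- (bm = bitmap & ((1 << (n-1)) - 1) is nonnegative — a band with a nonnegative mask — so it is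
--  tracked as a Nat, on which Python's &, - and bit_length are exact; chars[idx] is always in
--  range in Python thanks to the mask, ported with set/getD)
def acfLoopB (bm : Nat) (cs : List Char) : List Char :=
  if bm ≠ 0 then
    let rest := bm &&& (bm - 1)
    let idx := PySem.Int.bitLength ((bm - rest : Nat) : Int)
    acfLoopB rest (cs.set idx (PySem.Chars.upperChar (cs.getD idx ' ')))
  else cs
termination_by bm
decreasing_by have : bm &&& (bm - 1) ≤ bm - 1 := Nat.and_le_right; omega

def apply_case_flag_alt (word : String) (flag : Int) (bitmap : Int) : String :=
  if word = "" then word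
  else if flag = 0 then word
  else if flag = 1 then
    match PySem.Str.pyGet? word 0 with
    | some c => String.mk (PySem.Chars.upper [c] ++ PySem.Chars.slice word.toList (some 1) none)
    | none => word
  else if flag = 2 then PySem.Str.upper word
  else
    let low := PySem.Chars.lower word.toList
    let bm := (PySem.Int.band bitmap (((1 : Int) <<< (low.length - 1)) - 1)).toNat
    String.mk (acfLoopB bm low)

-- ===== PRECONDITION & SPEC =====
def Spec_apply_case_flag (word : String) (flag : Int) (bitmap : Int) (out : String) : Prop := out = apply_case_flag_alt word flag bitmap
instance (word : String) (flag : Int) (bitmap : Int) (out : String) : Decidable (Spec_apply_case_flag word flag bitmap out) := by unfold Spec_apply_case_flag; infer_instance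

-- ===== CLAIM (what is proved, stated in full; the proofs are below) =====
def Claim_equal_apply_case_flag : Prop := ∀ (word : String) (flag : Int) (bitmap : Int), Dom_apply_case_flag word flag bitmap → Spec_apply_case_flag word flag bitmap (apply_case_flag word flag bitmap)

-- ===== LEMMAS AND PROOFS =====

-- a & (1 << j) for a ≥ 0 and a < 0, through PySem.Int.band's two's-complement definition
theorem band_ofNat_pow (m j : Nat) :
    PySem.Int.band (Int.ofNat m) ((1 : Int) <<< j) = Int.ofNat ((m.testBit j).toNat * 2 ^ j) := by
  have hb : (1 : Int) <<< j = ((2 ^ j : Nat) : Int) := by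
    rw [Int.shiftLeft_eq]; push_cast; ring
  rw [hb]
  simp [PySem.Int.band]
  rw [show ((2:Int) ^ j).toNat = 2 ^ j by rw [← Nat.cast_ofNat (n := 2)]; rw [← Nat.cast_pow]; exact Int.toNat_natCast _]
  rw [Nat.and_two_pow]
  push_cast
  ring

theorem band_negSucc_pow (m j : Nat) :
    PySem.Int.band (Int.negSucc m) ((1 : Int) <<< j) = Int.ofNat ((1 - (m.testBit j).toNat) * 2 ^ j) := by
  have hb : (1 : Int) <<< j = ((2 ^ j : Nat) : Int) := by
    rw [Int.shiftLeft_eq]; push_cast; ring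
  rw [hb]
  simp [PySem.Int.band, Int.negSucc_not_nonneg]
  rw [show ((2:Int) ^ j).toNat = 2 ^ j by rw [← Nat.cast_ofNat (n := 2)]; rw [← Nat.cast_pow]; exact Int.toNat_natCast _]
  rw [Nat.and_comm, Nat.and_two_pow]
  cases h : m.testBit j <;> push_cast <;> simp

theorem one_shiftLeft_cast (n : Nat) : (1 : Int) <<< ((n : Int)) = (1 : Int) <<< n := by
  show ((Nat.shiftLeft' false 1 n : Nat) : Int) = Int.ofNat (1 <<< n)
  rw [Nat.shiftLeft'_false]
  rfl

-- Python bit_length of an isolated bit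
theorem pvBitLen_two_pow (k : Nat) : PySem.Int.bitLength (((2^k : Nat) : Int)) = k + 1 := by
  have h0 : ((2^k : Nat) : Int) ≠ 0 := by positivity
  have habs : (((2^k : Nat) : Int)).natAbs = 2^k := Int.natAbs_natCast _
  have h1 := PySem.Int.lt_two_pow_bitLength (((2^k : Nat) : Int))
  have h2 := PySem.Int.two_pow_bitLength_le (((2^k : Nat) : Int)) h0
  rw [habs] at h1 h2
  have hk1 : k < PySem.Int.bitLength ((2^k : Nat) : Int) := (Nat.pow_lt_pow_iff_right (by omega)).mp h1
  have hk2 : PySem.Int.bitLength ((2^k : Nat) : Int) - 1 ≤ k := (Nat.pow_le_pow_iff_right (by omega)).mp h2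
  omega

-- m & (m-1) clears exactly the lowest set bit of m
theorem pvLowbit (m : Nat) (hm : m ≠ 0) :
    ∃ k, m - (m &&& (m-1)) = 2^k ∧ m.testBit k = true ∧
      ∀ j, (m &&& (m-1)).testBit j = (m.testBit j && decide (j ≠ k)) := by
  induction m using Nat.strong_induction_on with
  | _ m ih =>
    rcases Nat.even_or_odd m with he | ho
    · -- m = 2t, t ≠ 0
      obtain ⟨t, ht⟩ := he
      have ht2 : m = 2 * t := by omega
      have htne : t ≠ 0 := by omega
      obtain ⟨k', h1, h2, h3⟩ := ih t (by omega) htne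
      have hand : m &&& (m - 1) = 2 * (t &&& (t - 1)) := by
        apply Nat.eq_of_testBit_eq
        intro j
        cases j with
        | zero =>
            simp [Nat.testBit_and, Nat.testBit_zero]
            omega
        | succ j =>
            rw [Nat.testBit_and, Nat.testBit_add_one, Nat.testBit_add_one, Nat.testBit_add_one]
            have e1 : m / 2 = t := by omega
            have e2 : (m - 1) / 2 = t - 1 := by omega
            rw [e1, e2, Nat.mul_div_cancel_left _ (by norm_num : 0 < 2), Nat.testBit_and]
      refine ⟨k' + 1, ?_, ?_, ?_⟩
      · have hle : t &&& (t-1) ≤ t := Nat.and_le_left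
        rw [hand, ht2]; omega
      · rw [Nat.testBit_add_one, ht2, Nat.mul_div_cancel_left t (by norm_num)]; exact h2
      · intro j
        rw [hand]
        cases j with
        | zero => simp [Nat.testBit_zero]; omega
        | succ j =>
            rw [Nat.testBit_add_one, Nat.testBit_add_one,
              Nat.mul_div_cancel_left _ (by norm_num : 0 < 2), ht2,
              Nat.mul_div_cancel_left t (by norm_num : 0 < 2), h3 j]
            simp
    · -- m = 2t+1
      obtain ⟨t, ht⟩ := ho
      have hand : m &&& (m - 1) = 2 * t := by
        apply Nat.eq_of_testBit_eq
        intro j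
        cases j with
        | zero => simp [Nat.testBit_and, Nat.testBit_zero]; omega
        | succ j =>
            rw [Nat.testBit_and, Nat.testBit_add_one, Nat.testBit_add_one, Nat.testBit_add_one]
            have e1 : m / 2 = t := by omega
            have e2 : (m - 1) / 2 = t := by omega
            rw [e1, e2, Nat.mul_div_cancel_left t (by norm_num : 0 < 2), Bool.and_self]
      refine ⟨0, ?_, ?_, ?_⟩
      · rw [hand]; omega
      · simp [Nat.testBit_zero]; omega
      · intro j
        rw [hand]
        cases j with
        | zero => simp [Nat.testBit_zero]
        | succ j =>
            rw [Nat.testBit_add_one, Nat.testBit_add_one,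
              Nat.mul_div_cancel_left t (by norm_num : 0 < 2)]
            have e1 : m / 2 = t := by omega
            rw [e1]
            simp

-- bits of the p-bit complement 2^p - 1 - r
theorem pvCompl_testBit : ∀ (p r j : Nat), r < 2^p →
    (2^p - 1 - r).testBit j = (decide (j < p) && !(r.testBit j)) := by
  intro p
  induction p with
  | zero =>
      intro r j hr
      have h0 : r = 0 := by simp at hr; omega
      subst h0
      simp [Nat.zero_testBit]
  | succ p ih =>
      intro r j hr
      have hp : 2^(p+1) = 2 * 2^p := by ring
      have hpos : 0 < 2^p := Nat.two_pow_pos p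
      have hy : 2^(p+1) - 1 - r = 2 * (2^p - 1 - r/2) + (1 - r % 2) := by omega
      cases j with
      | zero =>
          rw [Nat.testBit_zero, Nat.testBit_zero, hy]
          have : (2 * (2^p - 1 - r/2) + (1 - r % 2)) % 2 = 1 - r % 2 := by omega
          rw [this]
          rcases Nat.mod_two_eq_zero_or_one r with h | h <;> simp [h]
      | succ j =>
          rw [Nat.testBit_add_one, Nat.testBit_add_one, hy]
          have : (2 * (2^p - 1 - r/2) + (1 - r % 2)) / 2 = 2^p - 1 - r/2 := by omega
          rw [this, ih (r/2) j (by omega)]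
          simp [Nat.lt_succ_iff, Nat.succ_lt_succ_iff]

-- bit j of the masked bitmap  (bitmap & ((1 << p) - 1)).toNat  vs  A's test  bitmap & (1 << j) != 0
theorem pvMask_testBit (a : Int) (p j : Nat) (hj : j < p) :
    (PySem.Int.band a (((1 : Int) <<< p) - 1)).toNat.testBit j
      = decide (PySem.Int.band a ((1 : Int) <<< j) ≠ 0) := by
  have hb : (1 : Int) <<< p = ((2 ^ p : Nat) : Int) := by
    rw [Int.shiftLeft_eq]; push_cast; ring
  have hmask : ((1 : Int) <<< p) - 1 = ((2^p - 1 : Nat) : Int) := by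
    rw [hb]
    have : (1:Nat) ≤ 2^p := Nat.one_le_two_pow
    push_cast [this]
    ring
  cases a with
  | ofNat m =>
      have hba := band_ofNat_pow m j
      rw [Int.ofNat_eq_natCast] at hba
      rw [hmask, show (Int.ofNat m) = ((m : Nat) : Int) from rfl, PySem.Int.band_natCast,
        Int.toNat_natCast, Nat.testBit_and, hba]
      rw [Nat.testBit_two_pow_sub_one]
      have h2 : (0 < (m.testBit j).toNat * 2 ^ j) ↔ m.testBit j = true := by
        cases h : m.testBit j <;> simp [Nat.two_pow_pos]
      cases h : m.testBit j <;> simp [h, hj, Nat.two_pow_pos] <;> omega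
  | negSucc m =>
      have hband : PySem.Int.band (Int.negSucc m) ((2^p - 1 : Nat) : Int)
          = (( (2^p - 1) - ((2^p - 1) &&& m) : Nat) : Int) := by
        simp only [PySem.Int.band, Int.negSucc_not_nonneg, if_false,
          if_pos (Int.natCast_nonneg (2^p - 1)), Int.toNat_natCast]
        congr 2
        rw [show (-Int.negSucc m - 1) = ((m : Nat) : Int) by
          rw [Int.neg_negSucc]; push_cast; ring]
        rw [Int.toNat_natCast]
      rw [hmask, hband, Int.toNat_natCast]
      have hlt : (2^p - 1) &&& m < 2^p := by
        have : (2^p - 1) &&& m ≤ 2^p - 1 := Nat.and_le_left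
        have hpos : 0 < 2^p := Nat.two_pow_pos p
        omega
      have hbn := band_negSucc_pow m j
      rw [pvCompl_testBit p ((2^p - 1) &&& m) j hlt, Nat.testBit_and,
        Nat.testBit_two_pow_sub_one, hbn]
      cases h : m.testBit j <;> simp [h, hj, Nat.two_pow_pos] <;> omega

-- what B's set-bit loop computes, character by character
theorem loopB_spec (bm : Nat) : ∀ cs : List Char,
    (acfLoopB bm cs).length = cs.length ∧
    ∀ j (hj : j < cs.length),
      (acfLoopB bm cs)[j]? =
        some (if 1 ≤ j ∧ bm.testBit (j-1) = true then PySem.Chars.upperChar (cs[j]'hj) else cs[j]'hj) := by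
  induction bm using Nat.strong_induction_on with
  | _ bm ih =>
    intro cs
    by_cases h : bm = 0
    · subst h
      have hz : acfLoopB 0 cs = cs := by rw [acfLoopB]; simp
      rw [hz]
      refine ⟨rfl, fun j hj => ?_⟩
      rw [Nat.zero_testBit, if_neg (by simp), List.getElem?_eq_getElem hj]
    · obtain ⟨k, hk1, hk2, hk3⟩ := pvLowbit bm h
      have hlt : bm &&& (bm - 1) < bm := by
        have : bm &&& (bm - 1) ≤ bm - 1 := Nat.and_le_right
        omega
      rw [acfLoopB, if_pos h]
      simp only [hk1, pvBitLen_two_pow]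
      obtain ⟨ihlen, ihget⟩ := ih (bm &&& (bm - 1)) hlt
        (cs.set (k+1) (PySem.Chars.upperChar (cs.getD (k+1) ' ')))
      constructor
      · rw [ihlen, List.length_set]
      · intro j hj
        have hj' : j < (cs.set (k+1) (PySem.Chars.upperChar (cs.getD (k+1) ' '))).length := by
          rw [List.length_set]; exact hj
        rw [ihget j hj']
        congr 1
        have hset : (cs.set (k+1) (PySem.Chars.upperChar (cs.getD (k+1) ' ')))[j]'hj'
            = if k + 1 = j then PySem.Chars.upperChar (cs.getD (k+1) ' ') else cs[j]'hj :=
          List.getElem_set hj'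
        by_cases hjk : j = k + 1
        · subst hjk
          have hc1 : ¬(1 ≤ k + 1 ∧ (bm &&& (bm - 1)).testBit (k + 1 - 1) = true) := by
            rw [show k + 1 - 1 = k from rfl, hk3 k]; simp
          have hc2 : 1 ≤ k + 1 ∧ bm.testBit (k + 1 - 1) = true :=
            ⟨by omega, by rw [show k + 1 - 1 = k from rfl]; exact hk2⟩
          rw [if_neg hc1, if_pos hc2, hset, if_pos rfl, List.getD_eq_getElem cs ' ' hj]
        · have hne' : ¬(k + 1 = j) := fun hc => hjk hc.symm
          rw [hset, if_neg hne']
          rcases Nat.eq_zero_or_pos j with hj0 | hj1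
          · rw [if_neg (by omega), if_neg (by omega)]
          · have hne : j - 1 ≠ k := by omega
            simp [hk3 (j - 1), hne]

-- A's loop, cut off after the first m-1 range elements (proof device for the induction)
def acfFoldTo (bitmap : Int) (low : List Char) (m : Nat) : List Char :=
  (PySem.List.enumerate (PySem.List.pyRange 1 (m : Int) 1) 0).foldl
    (fun cs pc =>
      if PySem.Int.band bitmap ((1 : Int) <<< pc.1.toNat) ≠ 0 then
        cs.set pc.2.toNat (PySem.Chars.upperChar (cs.getD pc.2.toNat ' '))
      else cs) low

theorem acfLoopA_eq_foldTo (bitmap : Int) (low : List Char) :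
    acfLoopA bitmap low = acfFoldTo bitmap low low.length := rfl

theorem acfFoldTo_spec (bitmap : Int) (low : List Char) :
    ∀ m, m ≤ low.length →
      (acfFoldTo bitmap low m).length = low.length ∧
      ∀ k, (acfFoldTo bitmap low m)[k]? =
        if h : k < low.length then
          some (if 1 ≤ k ∧ k < m ∧ PySem.Int.band bitmap ((1 : Int) <<< (k - 1)) ≠ 0
                then PySem.Chars.upperChar (low[k]'h) else low[k]'h)
        else none := by
  intro m
  induction m with
  | zero =>
      intro _
      have hr : PySem.List.pyRange 1 ((0 : Nat) : Int) 1 = [] :=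
        PySem.List.pyRange_one_eq_nil (by norm_num)
      constructor
      · simp [acfFoldTo, hr, PySem.List.enumerate]
      · intro k
        simp [acfFoldTo, hr, PySem.List.enumerate]
        split
        · rename_i h
          rw [List.getElem?_eq_getElem h]
        · rename_i h
          rw [List.getElem?_eq_none_iff.mpr (by omega)]
  | succ m ih =>
      intro hm1
      obtain ⟨ihlen, ihget⟩ := ih (by omega)
      rcases Nat.eq_zero_or_pos m with hm0 | hmpos
      · subst hm0
        have hr : PySem.List.pyRange 1 ((1 : Nat) : Int) 1 = [] :=
          PySem.List.pyRange_one_eq_nil (by norm_num)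
        have hfold : acfFoldTo bitmap low 1 = low := by
          unfold acfFoldTo
          rw [show ((1 : Nat) : Int) = (0 : Int) + 1 by norm_num] at hr
          simp [hr, PySem.List.enumerate]
        constructor
        · rw [hfold]
        · intro k
          rw [hfold]
          split
          · rename_i h
            rw [List.getElem?_eq_getElem h]
            rw [if_neg (by omega)]
          · rename_i h
            rw [List.getElem?_eq_none_iff.mpr (by omega)]
      · -- m ≥ 1: split off the last range element
        have hsplit : PySem.List.pyRange 1 ((m + 1 : Nat) : Int) 1 =
            PySem.List.pyRange 1 ((m : Nat) : Int) 1 ++ [((m : Nat) : Int)] := by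
          have := PySem.List.pyRange_one_succ_right (a := 1) (b := ((m : Nat) : Int)) (by exact_mod_cast hmpos)
          rw [← this]
          norm_num
        have hlenr : (PySem.List.pyRange 1 ((m : Nat) : Int) 1).length = m - 1 := by
          rw [PySem.List.length_pyRange_one]
          omega
        have henum : PySem.List.enumerate (PySem.List.pyRange 1 ((m + 1 : Nat) : Int) 1) 0 =
            PySem.List.enumerate (PySem.List.pyRange 1 ((m : Nat) : Int) 1) 0 ++
              [(((m - 1 : Nat) : Int), ((m : Nat) : Int))] := by
          rw [hsplit, PySem.List.enumerate_append]
          congr 1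
          rw [PySem.List.enumerate_cons, PySem.List.enumerate_nil]
          rw [hlenr]
          norm_num
        have hstep : acfFoldTo bitmap low (m + 1) =
            (fun cs (pc : Int × Int) =>
              if PySem.Int.band bitmap ((1 : Int) <<< ((pc.1.toNat : Nat) : Int)) ≠ 0 then
                cs.set pc.2.toNat (PySem.Chars.upperChar (cs.getD pc.2.toNat ' '))
              else cs) (acfFoldTo bitmap low m) (((m - 1 : Nat) : Int), ((m : Nat) : Int)) := by
          unfold acfFoldTo
          rw [henum, List.foldl_append]
          rfl
        have htn1 : (((m - 1 : Nat) : Int)).toNat = m - 1 := Int.toNat_natCast _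
        have htn2 : (((m : Nat) : Int)).toNat = m := Int.toNat_natCast _
        have hmlt : m < low.length := by omega
        have hgetm : (acfFoldTo bitmap low m).getD m ' ' = low[m]'hmlt := by
          show (acfFoldTo bitmap low m)[m]?.getD ' ' = _
          rw [ihget m]
          rw [dif_pos hmlt]
          rw [if_neg (by omega : ¬ (1 ≤ m ∧ m < m ∧ PySem.Int.band bitmap ((1 : Int) <<< (m - 1)) ≠ 0))]
          rfl
        constructor
        · rw [hstep]
          simp only [htn1, htn2]
          split
          · simp [ihlen]
          · exact ihlen
        · intro k
          rw [hstep]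
          simp only [htn1, htn2]
          rw [one_shiftLeft_cast (m - 1)]
          by_cases hband : PySem.Int.band bitmap ((1 : Int) <<< (m - 1)) ≠ 0
          · rw [if_pos hband, hgetm]
            by_cases hkm : k = m
            · rw [hkm, List.getElem?_set_self (by rw [ihlen]; exact hmlt), dif_pos hmlt]
              congr 1
              rw [if_pos ⟨by omega, by omega, hband⟩]
            · rw [List.getElem?_set_ne (fun hc => hkm hc.symm), ihget k]
              by_cases hk : k < low.length
              · rw [dif_pos hk, dif_pos hk]
                congr 1
                by_cases hc : 1 ≤ k ∧ k < m ∧ PySem.Int.band bitmap ((1 : Int) <<< (k - 1)) ≠ 0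
                · rw [if_pos hc, if_pos ⟨hc.1, by omega, hc.2.2⟩]
                · rw [if_neg hc, if_neg (fun h2 => hc ⟨h2.1, by omega, h2.2.2⟩)]
              · rw [dif_neg hk, dif_neg hk]
          · rw [if_neg hband, ihget k]
            push_neg at hband
            by_cases hk : k < low.length
            · rw [dif_pos hk, dif_pos hk]
              congr 1
              by_cases hkm : k = m
              · rw [if_neg (by rintro ⟨_, h2, _⟩; omega),
                    if_neg (by rintro ⟨_, _, h3⟩; apply h3; rw [hkm]; exact hband)]
              · by_cases hc : 1 ≤ k ∧ k < m ∧ PySem.Int.band bitmap ((1 : Int) <<< (k - 1)) ≠ 0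
                · rw [if_pos hc, if_pos ⟨hc.1, by omega, hc.2.2⟩]
                · rw [if_neg hc, if_neg (fun h2 => hc ⟨h2.1, by omega, h2.2.2⟩)]
            · rw [dif_neg hk, dif_neg hk]

theorem loopA_length (bitmap : Int) (low : List Char) : (acfLoopA bitmap low).length = low.length := by
  rw [acfLoopA_eq_foldTo]
  exact (acfFoldTo_spec bitmap low low.length le_rfl).1

theorem loopA_getElem (bitmap : Int) (low : List Char) (k : Nat) (hk : k < low.length) :
    (acfLoopA bitmap low)[k]'(by rw [loopA_length]; exact hk) =
      if 1 ≤ k ∧ PySem.Int.band bitmap ((1 : Int) <<< (k - 1)) ≠ 0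
      then PySem.Chars.upperChar (low[k]'hk) else low[k]'hk := by
  have h := (acfFoldTo_spec bitmap low low.length le_rfl).2 k
  rw [dif_pos hk] at h
  rw [← acfLoopA_eq_foldTo] at h
  rw [List.getElem?_eq_getElem (by rw [loopA_length]; exact hk)] at h
  have := Option.some.inj h
  rw [this]
  have hiff : (1 ≤ k ∧ k < low.length ∧ PySem.Int.band bitmap ((1 : Int) <<< (k - 1)) ≠ 0) ↔
      (1 ≤ k ∧ PySem.Int.band bitmap ((1 : Int) <<< (k - 1)) ≠ 0) := by
    constructor
    · rintro ⟨a, _, c⟩; exact ⟨a, c⟩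
    · rintro ⟨a, c⟩; exact ⟨a, hk, c⟩
  rw [if_congr hiff rfl rfl]

-- the two mixed-case branches agree
theorem mixed_eq (bitmap : Int) (low : List Char) (h : low ≠ []) :
    acfLoopA bitmap low =
      acfLoopB (PySem.Int.band bitmap (((1 : Int) <<< (low.length - 1)) - 1)).toNat low := by
  have hn : 0 < low.length := List.length_pos_iff.mpr h
  set bm := (PySem.Int.band bitmap (((1 : Int) <<< (low.length - 1)) - 1)).toNat with hbm
  obtain ⟨hblen, hbget⟩ := loopB_spec bm low
  apply List.ext_getElem
  · rw [loopA_length, hblen]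
  · intro k hk1 hk2
    have hk : k < low.length := by rwa [loopA_length] at hk1
    rw [loopA_getElem bitmap low k hk]
    have := hbget k hk
    rw [List.getElem?_eq_getElem hk2] at this
    rw [Option.some.inj this]
    rcases Nat.eq_zero_or_pos k with hk0 | hkpos
    · subst hk0
      rw [if_neg (by omega), if_neg (by omega)]
    · have hbit : bm.testBit (k-1) = decide (PySem.Int.band bitmap ((1 : Int) <<< (k-1)) ≠ 0) := by
        rw [hbm]
        exact pvMask_testBit bitmap (low.length - 1) (k-1) (by omega)
      by_cases hband : PySem.Int.band bitmap ((1 : Int) <<< (k - 1)) ≠ 0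
      · rw [if_pos ⟨hkpos, hband⟩, if_pos ⟨hkpos, by rw [hbit]; simp [hband]⟩]
      · rw [if_neg (fun hc => hband hc.2), if_neg (fun hc => hband (by simpa [hbit] using hc.2))]

-- ===== VERDICT (by name: the statement is the Claim_ definition above) =====
theorem apply_case_flag_spec : Claim_equal_apply_case_flag := by
  intro word flag bitmap _
  unfold Spec_apply_case_flag apply_case_flag apply_case_flag_alt
  by_cases h0 : word = ""
  · simp [h0]
  · simp only [h0, if_false]
    by_cases h1 : flag = 0
    · simp [h1]
    · simp only [h1, if_false]
      by_cases h2 : flag = 1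
      · simp [h2]
      · simp only [h2, if_false]
        by_cases h3 : flag = 2
        · simp [h3]
        · simp only [h3, if_false]
          have hne : PySem.Chars.lower word.toList ≠ [] := by
            intro hc
            apply h0
            have : word.toList = [] := by
              have := congrArg List.length hc
              simpa [PySem.Chars.lower] using this
            exact String.toList_eq_nil_iff.mp this ▸ rfl
          rw [mixed_eq bitmap _ hne]
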